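-- pv_equiv track=rewrite | github.com/vivello/advent-of-code | 2023/day4.py | card_value
-- ===== SOURCE A (Python) =====
-- def card_value(winning,card):
--     win_count = 0
--     for num in card:
--         if num in winning:
--             win_count += 1
--     if win_count == 0:
--         return 0
--     else:
--         return 2 ** (win_count - 1)
-- ===== SOURCE B (Python) =====
-- def card_value(winning, card):
--     value = 0
--     for num in card:
--         if num in winning:
--             value = 1 if value == 0 else value * 2
--     return value
-- ===== Notes on version B (the rewrite author's own statement) =====
-- stated objective: simpler
-- what changed: replaces the match counter plus the 2**(n-1) closed form with a single running score that doubles (from 1) on each match, so no exponentiation or final branch is needed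
import Mathlib
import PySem

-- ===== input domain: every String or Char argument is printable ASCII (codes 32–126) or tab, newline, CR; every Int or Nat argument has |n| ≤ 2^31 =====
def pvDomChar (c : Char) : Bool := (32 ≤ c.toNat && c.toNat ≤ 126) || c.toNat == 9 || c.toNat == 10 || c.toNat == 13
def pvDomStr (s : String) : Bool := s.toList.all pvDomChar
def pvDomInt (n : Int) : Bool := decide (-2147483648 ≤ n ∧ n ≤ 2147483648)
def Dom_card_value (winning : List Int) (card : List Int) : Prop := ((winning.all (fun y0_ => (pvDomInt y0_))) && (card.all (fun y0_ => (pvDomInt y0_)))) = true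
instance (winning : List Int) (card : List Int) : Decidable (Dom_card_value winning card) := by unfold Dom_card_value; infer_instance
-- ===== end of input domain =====

-- B replaces A's match counter + 2**(n-1) closed form by a single running score doubled on each match (simpler; same cost).

-- ===== PORT A =====
def card_value (winning : List Int) (card : List Int) : Int :=
  let win_count : Int := card.foldl (fun win_count num =>
    if winning.contains num then win_count + 1 else win_count) 0
  if win_count = 0 then 0 else 2 ^ (win_count - 1).toNat

-- ===== PORT B =====
def card_value_alt (winning : List Int) (card : List Int) : Int :=
  card.foldl (fun value num =>
    if winning.contains num then (if value = 0 then 1 else value * 2) else value) 0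

-- ===== PRECONDITION & SPEC =====
def Spec_card_value (winning : List Int) (card : List Int) (out : Int) : Prop := out = card_value_alt winning card
instance (winning : List Int) (card : List Int) (out : Int) : Decidable (Spec_card_value winning card out) := by unfold Spec_card_value; infer_instance

-- ===== CLAIM (what is proved, stated in full; the proofs are below) =====
def Claim_equal_card_value : Prop := ∀ (winning : List Int) (card : List Int), Dom_card_value winning card → Spec_card_value winning card (card_value winning card)

-- ===== LEMMAS AND PROOFS =====

-- A's counter fold, shifted start
theorem pv_count_shift (w : List Int) (card : List Int) (c : Int) :
    card.foldl (fun win_count num => if w.contains num then win_count + 1 else win_count) c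
      = c + card.foldl (fun win_count num => if w.contains num then win_count + 1 else win_count) 0 := by
  induction card generalizing c with
  | nil => simp
  | cons n rest ih =>
    rw [List.foldl_cons, List.foldl_cons, ih, ih (if w.contains n then 0 + 1 else 0)]
    split_ifs <;> omega

theorem pv_count_nonneg (w : List Int) (card : List Int) :
    (0 : Int) ≤ card.foldl (fun win_count num => if w.contains num then win_count + 1 else win_count) (0 : Int) := by
  induction card with
  | nil => simp
  | cons n rest ih =>
    rw [List.foldl_cons]
    split_ifs
    · rw [pv_count_shift]; omega
    · exact ih

-- B's fold from a positive start multiplies by 2^(match count)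
theorem pv_alt_pos (w : List Int) (card : List Int) (v : Int) (hv : 0 < v) :
    card.foldl (fun value num => if w.contains num then (if value = 0 then 1 else value * 2) else value) v
      = v * 2 ^ (card.foldl (fun win_count num => if w.contains num then win_count + 1 else win_count) (0 : Int)).toNat := by
  induction card generalizing v with
  | nil => simp
  | cons n rest ih =>
    rw [List.foldl_cons, List.foldl_cons]
    have hc := pv_count_nonneg w rest
    by_cases h : w.contains n = true
    · have hne : ¬ (v = 0) := by omega
      have h2v : (0 : Int) < v * 2 := by omega
      rw [if_pos h, if_pos h, if_neg hne, ih (v * 2) h2v, pv_count_shift w rest ((0 : Int) + 1)]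
      have ht : ((0 : Int) + 1 + rest.foldl (fun win_count num => if w.contains num then win_count + 1 else win_count) 0).toNat
          = (rest.foldl (fun win_count num => if w.contains num then win_count + 1 else win_count) (0 : Int)).toNat + 1 := by omega
      rw [ht, pow_succ]
      ring
    · rw [if_neg h, if_neg h, ih v hv]

theorem pv_alt_eq (w : List Int) (card : List Int) :
    card.foldl (fun value num => if w.contains num then (if value = 0 then 1 else value * 2) else value) (0 : Int)
      = (if (card.foldl (fun win_count num => if w.contains num then win_count + 1 else win_count) (0 : Int)) = 0 then (0 : Int)
         else 2 ^ ((card.foldl (fun win_count num => if w.contains num then win_count + 1 else win_count) (0 : Int)) - 1).toNat) := by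
  induction card with
  | nil => simp
  | cons n rest ih =>
    rw [List.foldl_cons, List.foldl_cons]
    have hc := pv_count_nonneg w rest
    by_cases h : w.contains n = true
    · rw [if_pos h, if_pos h]
      have h0 : (if (0 : Int) = 0 then (1 : Int) else 0 * 2) = 1 := by norm_num
      rw [h0, pv_alt_pos w rest 1 one_pos, pv_count_shift w rest ((0 : Int) + 1)]
      have h1 : ¬ ((0 : Int) + 1 + rest.foldl (fun win_count num => if w.contains num then win_count + 1 else win_count) 0 = 0) := by omega
      have ht : (rest.foldl (fun win_count num => if w.contains num then win_count + 1 else win_count) (0 : Int)).toNat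
          = ((0 : Int) + 1 + rest.foldl (fun win_count num => if w.contains num then win_count + 1 else win_count) 0 - 1).toNat := by omega
      rw [if_neg h1, one_mul, ht]
    · rw [if_neg h, if_neg h]
      exact ih

-- ===== VERDICT (by name: the statement is the Claim_ definition above) =====
theorem card_value_spec : Claim_equal_card_value := by
  intro winning card _
  exact (pv_alt_eq winning card).symm
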